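-- pv_equiv track=rewrite | github.com/Conut-1/Python_Learning | 프로그래머스/Lv.1/옹알이.py | solve
-- ===== SOURCE A (Python) =====
-- def solve(b):
--     possible = ["aya", "ye", "woo", "ma"]
--     i = 0
--     prev = ''
--     while i < len(b):
--         for p in possible:
--             if p == b[i:i + len(p)] and prev != p:
--                 i += len(p)
--                 prev = p
--                 break
--         else:
--             return False
--     return True
-- ===== SOURCE B (Python) =====
-- def solve(b):
--     # Pass 1: greedily tokenize the whole string (no prev state).
--     possible = ["aya", "ye", "woo", "ma"]
--     tokens = []
--     i = 0
--     while i < len(b):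
--         for p in possible:
--             if b[i:i + len(p)] == p:
--                 tokens.append(p)
--                 i += len(p)
--                 break
--         else:
--             return False
--     # Pass 2: reject adjacent repeats.
--     for j in range(1, len(tokens)):
--         if tokens[j] == tokens[j - 1]:
--             return False
--     return True
-- ===== Notes on version B (the rewrite author's own statement) =====
-- stated objective: alternative
-- what changed: A's single fused scan that interleaves greedy token matching with a prev-repeat check is split into two passes: first greedily tokenize the whole string into a token list (no prev state), then a separate scan rejecting adjacent equal tokens.
import Mathlib
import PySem

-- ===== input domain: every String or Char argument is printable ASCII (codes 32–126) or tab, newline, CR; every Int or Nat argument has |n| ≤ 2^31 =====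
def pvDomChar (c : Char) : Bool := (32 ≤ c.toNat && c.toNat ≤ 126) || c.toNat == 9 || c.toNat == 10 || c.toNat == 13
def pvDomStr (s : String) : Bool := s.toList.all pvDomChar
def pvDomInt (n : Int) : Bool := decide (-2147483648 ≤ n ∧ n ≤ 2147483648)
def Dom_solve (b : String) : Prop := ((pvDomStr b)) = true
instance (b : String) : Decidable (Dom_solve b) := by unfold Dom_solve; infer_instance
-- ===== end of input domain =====

-- B splits A's single fused scan (greedy match + prev-repeat check) into two passes:
-- greedy tokenization into a list, then a separate adjacent-repeat scan; objective: alternative decomposition.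

-- ===== PORT A =====
-- the four babbling tokens, as char lists
def tokAya : List Char := ['a', 'y', 'a']
def tokYe : List Char := ['y', 'e']
def tokWoo : List Char := ['w', 'o', 'o']
def tokMa : List Char := ['m', 'a']

-- b[i:i+len p] == p on the remaining suffix
def matchTok (t : List Char) (cs : List Char) : Bool := cs.take t.length == t

-- A's while loop: i becomes the remaining suffix cs, prev carried along; the for-else is the if-chain.
def solveGoA (cs : List Char) (prev : List Char) : Bool :=
  match cs with
  | [] => true
  | c :: rest =>
    if matchTok tokAya (c :: rest) && prev != tokAya then solveGoA ((c :: rest).drop 3) tokAya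
    else if matchTok tokYe (c :: rest) && prev != tokYe then solveGoA ((c :: rest).drop 2) tokYe
    else if matchTok tokWoo (c :: rest) && prev != tokWoo then solveGoA ((c :: rest).drop 3) tokWoo
    else if matchTok tokMa (c :: rest) && prev != tokMa then solveGoA ((c :: rest).drop 2) tokMa
    else false
termination_by cs.length
decreasing_by all_goals simp

def solve (b : String) : Bool := solveGoA b.toList []

-- ===== PORT B =====
-- Pass 1 of Source B: greedy tokenization of the whole string, no prev state; none = the 'return False' in the else.
def tokenizeB (cs : List Char) : Option (List (List Char)) :=
  match cs with
  | [] => some []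
  | c :: rest =>
    if matchTok tokAya (c :: rest) then (tokenizeB ((c :: rest).drop 3)).map (tokAya :: ·)
    else if matchTok tokYe (c :: rest) then (tokenizeB ((c :: rest).drop 2)).map (tokYe :: ·)
    else if matchTok tokWoo (c :: rest) then (tokenizeB ((c :: rest).drop 3)).map (tokWoo :: ·)
    else if matchTok tokMa (c :: rest) then (tokenizeB ((c :: rest).drop 2)).map (tokMa :: ·)
    else none
termination_by cs.length
decreasing_by all_goals simp

-- Pass 2 of Source B: tokens[j] == tokens[j-1] for some j → False
def noAdjRep : List (List Char) → Bool
  | [] => true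
  | [_] => true
  | x :: y :: rest => x != y && noAdjRep (y :: rest)

def solve_alt (b : String) : Bool :=
  match tokenizeB b.toList with
  | none => false
  | some ts => noAdjRep ts

-- ===== PRECONDITION & SPEC =====
def Spec_solve (b : String) (out : Bool) : Prop := out = solve_alt b
instance (b : String) (out : Bool) : Decidable (Spec_solve b out) := by unfold Spec_solve; infer_instance

-- ===== CLAIM (what is proved, stated in full; the proofs are below) =====
def Claim_equal_solve : Prop := ∀ (b : String), Dom_solve b → Spec_solve b (solve b)

-- ===== LEMMAS AND PROOFS =====

-- chain prev ts: the repeat check as A performs it, threading prev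
def chainRep (prev : List Char) : List (List Char) → Bool
  | [] => true
  | t :: ts => prev != t && chainRep t ts

theorem chainRep_eq_noAdjRep (t : List Char) (ts : List (List Char)) :
    chainRep t ts = noAdjRep (t :: ts) := by
  induction ts generalizing t with
  | nil => rfl
  | cons y ys ih => simp [chainRep, noAdjRep, ih y]

-- at most one token matches at any position (distinct first characters)
theorem match_unique (c : Char) (rest : List Char) :
    (matchTok tokAya (c :: rest) = true → c = 'a') ∧
    (matchTok tokYe (c :: rest) = true → c = 'y') ∧
    (matchTok tokWoo (c :: rest) = true → c = 'w') ∧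
    (matchTok tokMa (c :: rest) = true → c = 'm') := by
  refine ⟨?_, ?_, ?_, ?_⟩ <;>
    · intro h
      simp [matchTok, tokAya, tokYe, tokWoo, tokMa] at h
      cases rest with
      | nil => simp_all [List.take]
      | cons d ds => cases ds <;> simp_all [List.take]

-- core lemma: A's fused loop equals tokenize-then-chain
theorem goA_eq (n : Nat) : ∀ cs : List Char, cs.length ≤ n → ∀ prev,
    solveGoA cs prev =
      match tokenizeB cs with
      | none => false
      | some ts => chainRep prev ts := by
  induction n with
  | zero =>
    intro cs hlen prev
    have : cs = [] := by cases cs <;> simp_all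
    subst this; simp [solveGoA, tokenizeB, chainRep]
  | succ n ih =>
    intro cs hlen prev
    cases cs with
    | nil => simp [solveGoA, tokenizeB, chainRep]
    | cons c rest =>
      rw [solveGoA, tokenizeB]
      obtain ⟨ha, hy, hw, hm⟩ := match_unique c rest
      by_cases h1 : matchTok tokAya (c :: rest) = true
      · have hc := ha h1
        have h2 : matchTok tokYe (c :: rest) = false := by
          cases hh : matchTok tokYe (c :: rest)
          · rfl
          · exact absurd (hy hh ▸ hc) (by subst hc; simp_all)
        have h3 : matchTok tokWoo (c :: rest) = false := by
          cases hh : matchTok tokWoo (c :: rest)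
          · rfl
          · exact absurd (hw hh ▸ hc) (by subst hc; simp_all)
        have h4 : matchTok tokMa (c :: rest) = false := by
          cases hh : matchTok tokMa (c :: rest)
          · rfl
          · exact absurd (hm hh ▸ hc) (by subst hc; simp_all)
        have ihd := ih ((c :: rest).drop 3) (by simp only [List.length_drop, List.length_cons] at hlen ⊢; omega) tokAya
        by_cases hp : prev = tokAya
        · subst hp
          simp only [h1, h2, h3, h4, bne_self_eq_false, Bool.and_false,
            Bool.false_and, if_false, if_true, Bool.true_and, Bool.and_true]
          cases htk : tokenizeB ((c :: rest).drop 3) <;>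
            simp [htk, chainRep]
        · have hp' : (prev != tokAya) = true := by simp [hp]
          simp only [h1, hp', Bool.true_and, Bool.and_true, if_true]
          rw [ihd]
          cases htk : tokenizeB ((c :: rest).drop 3) <;>
            simp [htk, chainRep, hp]
      · by_cases h2 : matchTok tokYe (c :: rest) = true
        · have hc := hy h2
          have h3 : matchTok tokWoo (c :: rest) = false := by
            cases hh : matchTok tokWoo (c :: rest)
            · rfl
            · exact absurd (hw hh ▸ hc) (by subst hc; simp_all)
          have h4 : matchTok tokMa (c :: rest) = false := by
            cases hh : matchTok tokMa (c :: rest)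
            · rfl
            · exact absurd (hm hh ▸ hc) (by subst hc; simp_all)
          have ihd := ih ((c :: rest).drop 2) (by simp only [List.length_drop, List.length_cons] at hlen ⊢; omega) tokYe
          by_cases hp : prev = tokYe
          · subst hp
            simp only [h1, h2, h3, h4, bne_self_eq_false, Bool.and_false,
              Bool.false_and, if_false, if_true, Bool.true_and, Bool.and_true]
            cases htk : tokenizeB ((c :: rest).drop 2) <;>
              simp [htk, chainRep]
          · have hp' : (prev != tokYe) = true := by simp [hp]
            simp only [h1, h2, hp', Bool.true_and, Bool.and_true, Bool.false_and,
              if_false, if_true]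
            rw [ihd]
            cases htk : tokenizeB ((c :: rest).drop 2) <;>
              simp [htk, chainRep, hp]
        · by_cases h3 : matchTok tokWoo (c :: rest) = true
          · have hc := hw h3
            have h4 : matchTok tokMa (c :: rest) = false := by
              cases hh : matchTok tokMa (c :: rest)
              · rfl
              · exact absurd (hm hh ▸ hc) (by subst hc; simp_all)
            have ihd := ih ((c :: rest).drop 3) (by simp only [List.length_drop, List.length_cons] at hlen ⊢; omega) tokWoo
            by_cases hp : prev = tokWoo
            · subst hp
              simp only [h1, h2, h3, h4, bne_self_eq_false, Bool.and_false,
                Bool.false_and, if_false, if_true, Bool.true_and, Bool.and_true]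
              cases htk : tokenizeB ((c :: rest).drop 3) <;>
                simp [htk, chainRep]
            · have hp' : (prev != tokWoo) = true := by simp [hp]
              simp only [h1, h2, h3, hp', Bool.true_and, Bool.and_true,
                Bool.false_and, if_false, if_true]
              rw [ihd]
              cases htk : tokenizeB ((c :: rest).drop 3) <;>
                simp [htk, chainRep, hp]
          · by_cases h4 : matchTok tokMa (c :: rest) = true
            · have ihd := ih ((c :: rest).drop 2) (by simp only [List.length_drop, List.length_cons] at hlen ⊢; omega) tokMa
              by_cases hp : prev = tokMa
              · subst hp
                simp only [h1, h2, h3, h4, bne_self_eq_false, Bool.and_false,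
                  Bool.false_and, if_false, if_true, Bool.true_and, Bool.and_true]
                cases htk : tokenizeB ((c :: rest).drop 2) <;>
                  simp [htk, chainRep]
              · have hp' : (prev != tokMa) = true := by simp [hp]
                simp only [h1, h2, h3, h4, hp', Bool.true_and, Bool.and_true,
                  Bool.false_and, if_false, if_true]
                rw [ihd]
                cases htk : tokenizeB ((c :: rest).drop 2) <;>
                  simp [htk, chainRep, hp]
            · simp [h1, h2, h3, h4]

-- tokens produced by tokenizeB are never empty (so chainRep [] starts like noAdjRep)
theorem tokenizeB_ne_nil (n : Nat) : ∀ cs : List Char, cs.length ≤ n →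
    ∀ ts, tokenizeB cs = some ts → ∀ t ∈ ts, t ≠ ([] : List Char) := by
  induction n with
  | zero =>
    intro cs hlen ts hts t ht
    have : cs = [] := by cases cs <;> simp_all
    subst this; simp [tokenizeB] at hts; subst hts; simp at ht
  | succ n ih =>
    intro cs hlen ts hts t ht
    cases cs with
    | nil => simp [tokenizeB] at hts; subst hts; simp at ht
    | cons c rest =>
      rw [tokenizeB] at hts
      split_ifs at hts <;>
        first
        | (obtain ⟨ts', hts', rfl⟩ := Option.map_eq_some_iff.mp hts
           rcases List.mem_cons.mp ht with rfl | hmem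
           · simp [tokAya, tokYe, tokWoo, tokMa]
           · exact ih _ (by simp only [List.length_drop, List.length_cons] at hlen ⊢; omega) ts' hts' t hmem)
        | simp at hts

-- ===== VERDICT (by name: the statement is the Claim_ definition above) =====
theorem solve_spec : Claim_equal_solve := by
  intro b _
  unfold Spec_solve solve solve_alt
  rw [goA_eq b.toList.length b.toList le_rfl []]
  cases htk : tokenizeB b.toList with
  | none => rfl
  | some ts =>
    cases ts with
    | nil => rfl
    | cons t ts' =>
      have hne := tokenizeB_ne_nil b.toList.length b.toList le_rfl _ htk t
        (List.mem_cons_self ..)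
      simp only [chainRep]
      rw [chainRep_eq_noAdjRep]
      have : (([] : List Char) != t) = true := by
        cases t with
        | nil => exact absurd rfl hne
        | cons _ _ => rfl
      simp [this]
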